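-- pv_equiv track=rewrite | github.com/Michaelx618/moonlet | ai_shell/prompt_buffer.py | _request_mentions_neighborhood
-- ===== SOURCE A (Python) =====
-- def _request_mentions_neighborhood(user_text: str) -> bool:
--     low = (user_text or "").lower()
--     phrases = (
--         "nearby",
--         "neighbor",
--         "context around",
--         "around this",
--         "around that",
--         "above",
--         "below",
--         "adjacent",
--         "surrounding",
--         "depends on nearby",
--     )
--     return any(p in low for p in phrases)
-- ===== SOURCE B (Python) =====
-- _PHRASES = (
--     "nearby",
--     "neighbor",
--     "context around",
--     "around this",
--     "around that",
--     "above",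
--     "below",
--     "adjacent",
--     "surrounding",
--     "depends on nearby",
-- )
--
--
-- def _build_trie(phrases):
--     # Prefix trie of the phrases; the key None marks a phrase end.
--     root = {}
--     for p in phrases:
--         node = root
--         for ch in p:
--             node = node.setdefault(ch, {})
--         node[None] = True
--     return root
--
--
-- _TRIE = _build_trie(_PHRASES)
--
--
-- def _request_mentions_neighborhood(user_text: str) -> bool:
--     low = (user_text or "").lower()
--     n = len(low)
--     for i in range(n):
--         node = _TRIE
--         j = i
--         while True:
--             if None in node:
--                 return True
--             if j >= n:
--                 break
--             node = node.get(low[j])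
--             if node is None:
--                 break
--             j += 1
--     return False
-- ===== Notes on version B (the rewrite author's own statement) =====
-- stated objective: alternative
-- what changed: Replaces A's ten independent whole-text substring scans ('p in low' per phrase) with a prefix trie of the phrases built once, walked from each text position so shared phrase prefixes ('around this'/'around that', 'above'/'adjacent') are tested by a single edge traversal.
import Mathlib
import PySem

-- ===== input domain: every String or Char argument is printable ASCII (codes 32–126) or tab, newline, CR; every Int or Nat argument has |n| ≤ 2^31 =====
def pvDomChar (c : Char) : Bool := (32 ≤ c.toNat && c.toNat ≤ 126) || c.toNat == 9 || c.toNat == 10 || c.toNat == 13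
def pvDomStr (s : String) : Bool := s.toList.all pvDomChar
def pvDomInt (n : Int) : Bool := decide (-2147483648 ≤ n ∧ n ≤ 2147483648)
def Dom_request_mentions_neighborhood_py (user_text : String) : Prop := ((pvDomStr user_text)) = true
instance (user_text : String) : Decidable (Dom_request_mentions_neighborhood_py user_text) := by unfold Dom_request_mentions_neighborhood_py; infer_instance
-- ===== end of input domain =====

-- B: builds a prefix trie of the phrases once and walks it from each position, instead of A's ten independent whole-text substring scans (alternative algorithm/data structure, same behaviour).


-- ===== PORT A =====
def pvPhrasesA : List String :=
  ["nearby", "neighbor", "context around", "around this", "around that",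
   "above", "below", "adjacent", "surrounding", "depends on nearby"]

-- A: `(user_text or "").lower()` then `any(p in low for p in phrases)`
def request_mentions_neighborhood_py (user_text : String) : Bool :=
  let low := PySem.Str.lower (if user_text == "" then "" else user_text)
  pvPhrasesA.any (fun p => PySem.Str.isIn p low)

-- ===== PORT B =====
-- (B shares the phrase-list constant pvPhrasesA with A; Source B's own _PHRASES tuple is identical.)
-- A trie node list: `node k b kch sib` = child keyed by char k, terminal flag b
-- (Python's `None in node`), its own children kch, and the remaining siblings sib
-- (the association-list reading of B's per-node dict, in insertion order).
inductive PvT where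
  | nil : PvT
  | node : Char → Bool → PvT → PvT → PvT
deriving DecidableEq, Repr

-- B's `_build_trie` inner loop: descend/extend along the word, mark the end.
def pvFresh : Char → List Char → PvT
  | c, [] => PvT.node c true PvT.nil PvT.nil
  | c, c' :: cs => PvT.node c false (pvFresh c' cs) PvT.nil

def pvIns : PvT → Char → List Char → PvT
  | PvT.nil, c, cs => pvFresh c cs
  | PvT.node k b kch sib, c, cs =>
      if k == c then
        match cs with
        | [] => PvT.node k true kch sib
        | c' :: cs' => PvT.node k b (pvIns kch c' cs') sib
      else PvT.node k b kch (pvIns sib c cs)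

-- fold of B's `for p in phrases` build loop; the root's own terminal flag is the Bool.
def pvBuildStep : Bool × PvT → List Char → Bool × PvT
  | (_, t), [] => (true, t)
  | (bt, t), c :: cs => (bt, pvIns t c cs)

def pvTrie : Bool × PvT := (pvPhrasesA.map String.toList).foldl pvBuildStep (false, PvT.nil)

-- B's inner `while` walk: follow trie edges along the text, true on a terminal.
def pvWalkAt : PvT → Char → List Char → Bool
  | PvT.nil, _, _ => false
  | PvT.node k b kch sib, c, rest =>
      (if k == c then
        (b || match rest with
          | [] => false
          | c' :: r' => pvWalkAt kch c' r')
      else false) || pvWalkAt sib c rest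

-- B's outer `for i in range(n)` loop over start positions.
def pvScan (r : Bool × PvT) : List Char → Bool
  | [] => false
  | c :: rest => (r.1 || pvWalkAt r.2 c rest) || pvScan r rest

def request_mentions_neighborhood_py_alt (user_text : String) : Bool :=
  let low := PySem.Str.lower (if user_text == "" then "" else user_text)
  pvScan pvTrie low.toList

-- ===== PRECONDITION & SPEC =====
def Spec_request_mentions_neighborhood_py (user_text : String) (out : Bool) : Prop := out = request_mentions_neighborhood_py_alt user_text
instance (user_text : String) (out : Bool) : Decidable (Spec_request_mentions_neighborhood_py user_text out) := by unfold Spec_request_mentions_neighborhood_py; infer_instance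

-- ===== CLAIM (what is proved, stated in full; the proofs are below) =====
def Claim_equal_request_mentions_neighborhood_py : Prop := ∀ (user_text : String), Dom_request_mentions_neighborhood_py user_text → Spec_request_mentions_neighborhood_py user_text (request_mentions_neighborhood_py user_text)

-- ===== LEMMAS AND PROOFS =====

-- The words stored in a trie child list (each is nonempty: it starts with its node's key).
def pvWordsL : PvT → List (List Char)
  | PvT.nil => []
  | PvT.node k b kch sib =>
      (if b then [[k]] else []) ++ (pvWordsL kch).map (k :: ·) ++ pvWordsL sib

lemma pvWordsL_ne_nil (t : PvT) : ∀ w ∈ pvWordsL t, w ≠ [] := by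
  induction t with
  | nil => simp [pvWordsL]
  | node k b kch sib ih1 ih2 =>
      intro w hw
      simp only [pvWordsL, List.mem_append, List.mem_map] at hw
      rcases hw with (hw | ⟨w', _, rfl⟩) | hw
      · split at hw <;> simp_all
      · simp
      · exact ih2 w hw

lemma pvWalkAt_iff (t : PvT) (c : Char) (rest : List Char) :
    pvWalkAt t c rest = true ↔ ∃ w ∈ pvWordsL t, w <+: (c :: rest) := by
  induction t generalizing c rest with
  | nil => simp [pvWalkAt, pvWordsL]
  | node k b kch sib ih1 ih2 =>
      simp only [pvWalkAt, Bool.or_eq_true]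
      constructor
      · rintro (hif | hs)
        · have hk : k = c := by by_contra h; simp [h] at hif
          subst hk
          simp only [beq_self_eq_true, if_true, Bool.or_eq_true] at hif
          rcases hif with hb | hm
          · exact ⟨[k], by simp [pvWordsL, hb], ⟨rest, rfl⟩⟩
          · cases rest with
            | nil => simp at hm
            | cons c' r' =>
                obtain ⟨w', hw', hp⟩ := (ih1 c' r').mp hm
                refine ⟨k :: w', ?_, List.cons_prefix_cons.mpr ⟨rfl, hp⟩⟩
                simp only [pvWordsL, List.mem_append, List.mem_map]
                exact Or.inl (Or.inr ⟨w', hw', rfl⟩)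
        · obtain ⟨w, hw, hp⟩ := (ih2 c rest).mp hs
          refine ⟨w, ?_, hp⟩
          simp only [pvWordsL, List.mem_append]
          exact Or.inr hw
      · rintro ⟨w, hw, hp⟩
        simp only [pvWordsL, List.mem_append, List.mem_map] at hw
        rcases hw with (h1 | ⟨w', hw', rfl⟩) | h3
        · by_cases hb : b = true
          · simp [hb] at h1
            subst h1
            rcases List.cons_prefix_cons.mp hp with ⟨rfl, -⟩
            left; simp [hb]
          · simp [hb] at h1
        · rcases List.cons_prefix_cons.mp hp with ⟨rfl, hp'⟩
          cases rest with
          | nil => exact absurd (List.prefix_nil.mp hp') (pvWordsL_ne_nil kch w' hw')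
          | cons c' r' =>
              have hm : pvWalkAt kch c' r' = true := (ih1 c' r').mpr ⟨w', hw', hp'⟩
              left; simp [hm]
        · right; exact (ih2 c rest).mpr ⟨w, h3, hp⟩

lemma pvScan_eq (r : Bool × PvT) (hb : r.1 = false) (cs : List Char) :
    pvScan r cs = (pvWordsL r.2).any (fun w => PySem.Chars.isIn w cs) := by
  induction cs with
  | nil =>
      simp only [pvScan]
      symm
      simp only [List.any_eq_false]
      intro w hw
      rw [PySem.Chars.isIn_iff_infix, List.infix_nil]
      exact pvWordsL_ne_nil _ w hw
  | cons c rest ih =>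
      simp only [pvScan, hb, Bool.false_or, ih]
      rw [Bool.eq_iff_iff]
      simp only [Bool.or_eq_true, List.any_eq_true, pvWalkAt_iff]
      constructor
      · rintro (⟨w, hw, hp⟩ | ⟨w, hw, hin⟩)
        · refine ⟨w, hw, ?_⟩
          rw [← PySem.Chars.exists_prefix_drop_iff_isIn]
          exact ⟨0, by simpa using hp⟩
        · refine ⟨w, hw, ?_⟩
          rw [← PySem.Chars.exists_prefix_drop_iff_isIn] at hin ⊢
          obtain ⟨j, hj⟩ := hin
          exact ⟨j + 1, by simpa using hj⟩
      · rintro ⟨w, hw, hin⟩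
        rw [← PySem.Chars.exists_prefix_drop_iff_isIn] at hin
        obtain ⟨j, hj⟩ := hin
        cases j with
        | zero => exact Or.inl ⟨w, hw, by simpa using hj⟩
        | succ j =>
            right
            refine ⟨w, hw, ?_⟩
            rw [← PySem.Chars.exists_prefix_drop_iff_isIn]
            exact ⟨j, by simpa using hj⟩

-- The concrete trie stores exactly the phrase list (as char lists, up to order),
-- and its root is not terminal.
lemma pvTrie_fst : pvTrie.1 = false := by decide

lemma pvTrie_words_perm :
    (pvWordsL pvTrie.2).Perm (pvPhrasesA.map String.toList) := by decide

-- ===== VERDICT (by name: the statement is the Claim_ definition above) =====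
theorem request_mentions_neighborhood_py_spec : Claim_equal_request_mentions_neighborhood_py := by
  intro user_text _
  unfold Spec_request_mentions_neighborhood_py
  unfold request_mentions_neighborhood_py request_mentions_neighborhood_py_alt
  show pvPhrasesA.any _ = pvScan pvTrie _
  rw [pvScan_eq pvTrie pvTrie_fst, List.Perm.any_eq pvTrie_words_perm, List.any_map]
  simp [PySem.Str.isIn, Function.comp_def]
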